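-- pv_equiv track=rewrite | github.com/Himjz/pytorch_federated_learning-main | results/draw.py | get_common_metrics
-- ===== SOURCE A (Python) =====
-- def get_common_metrics(data_dict):
--     if not data_dict:
--         return []
--     first_data = next(iter(data_dict.values()))
--     common_metrics = set(first_data.keys())
--     for data in data_dict.values():
--         common_metrics.intersection_update(data.keys())
--
--     priority_order = ['accuracy', 'precision', 'recall', 'f1', 'loss',
--                       'client_train_avg', 'server_train', 'client_update_avg',
--                       'global_agg', 'model_transfer_avg']
--     sorted_metrics = []
--     for metric in priority_order:
--         if metric in common_metrics:
--             sorted_metrics.append(metric)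
--             common_metrics.remove(metric)
--     sorted_metrics.extend(sorted(common_metrics))
--     return sorted_metrics
-- ===== SOURCE B (Python) =====
-- def get_common_metrics(data_dict):
--     if not data_dict:
--         return []
--     values = list(data_dict.values())
--     common = set(values[0].keys())
--     for data in values[1:]:
--         common &= data.keys()
--     priority_order = ['accuracy', 'precision', 'recall', 'f1', 'loss',
--                       'client_train_avg', 'server_train', 'client_update_avg',
--                       'global_agg', 'model_transfer_avg']
--     rank = {m: i for i, m in enumerate(priority_order)}
--     return sorted(common, key=lambda m: (rank.get(m, len(priority_order)), m))
-- ===== Notes on version B (the rewrite author's own statement) =====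
-- stated objective: simpler
-- what changed: A's two-phase output stage (walk the priority list appending present metrics while deleting them from the set, then extend with the sorted leftover) is replaced by one keyed sort of the common set under the key (rank in the priority list with a default of its length, then the metric name).
import Mathlib
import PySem

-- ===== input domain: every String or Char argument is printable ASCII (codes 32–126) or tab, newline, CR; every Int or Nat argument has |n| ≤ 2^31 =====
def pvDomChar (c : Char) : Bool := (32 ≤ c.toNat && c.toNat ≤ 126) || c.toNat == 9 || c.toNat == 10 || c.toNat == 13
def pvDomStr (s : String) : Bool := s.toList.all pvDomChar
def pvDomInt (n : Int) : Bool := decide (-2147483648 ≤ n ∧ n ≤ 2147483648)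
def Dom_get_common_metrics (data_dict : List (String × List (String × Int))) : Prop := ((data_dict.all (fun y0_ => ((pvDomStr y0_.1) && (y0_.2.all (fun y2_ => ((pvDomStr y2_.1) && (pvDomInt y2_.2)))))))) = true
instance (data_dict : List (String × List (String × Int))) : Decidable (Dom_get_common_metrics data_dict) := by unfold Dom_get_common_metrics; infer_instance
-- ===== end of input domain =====

-- B replaces A's two-phase output stage (walk the priority list appending present keys,
-- then append the sorted leftover) by one keyed sort of the common set under the key
-- (rank in the priority list, defaulting to its length; then the metric name). Objective: simpler.

-- the priority list both Pythons write out literally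
def pvPriority : List String :=
  ["accuracy", "precision", "recall", "f1", "loss",
   "client_train_avg", "server_train", "client_update_avg",
   "global_agg", "model_transfer_avg"]

-- ===== PORT A =====
def get_common_metrics (data_dict : List (String × List (String × Int))) : List String :=
  match data_dict with
  | [] => []
  | first :: _ =>
    let common :=
      data_dict.foldl (fun c p => PySem.Set.inter c (PySem.Dict.keys ⟨p.2⟩))
        (PySem.Set.ofList (PySem.Dict.keys ⟨first.2⟩))
    let res :=
      pvPriority.foldl
        (fun (st : List String × PySem.Set String) m =>
          if PySem.Set.contains st.2 m then (st.1 ++ [m], PySem.Set.discard st.2 m) else st)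
        ([], common)
    res.1 ++ PySem.List.sorted res.2 (fun x => x) false

-- ===== PORT B =====
-- rank = {m: i for i, m in enumerate(priority_order)}
def pvRank : PySem.Dict String Int :=
  (PySem.List.enumerate pvPriority).foldl (fun d p => PySem.Dict.insert d p.2 p.1) ⟨[]⟩

def get_common_metrics_alt (data_dict : List (String × List (String × Int))) : List String :=
  match data_dict with
  | [] => []
  | first :: rest =>
    let common :=
      rest.foldl (fun c p => PySem.Set.inter c (PySem.Dict.keys ⟨p.2⟩))
        (PySem.Set.ofList (PySem.Dict.keys ⟨first.2⟩))
    PySem.List.sorted2 common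
      (fun m => PySem.Dict.getD pvRank m ((pvPriority.length : Int))) (fun m => m) false

-- ===== PRECONDITION & SPEC =====
def Spec_get_common_metrics (data_dict : List (String × List (String × Int))) (out : List String) : Prop := out = get_common_metrics_alt data_dict
instance (data_dict : List (String × List (String × Int))) (out : List String) : Decidable (Spec_get_common_metrics data_dict out) := by unfold Spec_get_common_metrics; infer_instance

-- ===== CLAIM (what is proved, stated in full; the proofs are below) =====
def Claim_equal_get_common_metrics : Prop := ∀ (data_dict : List (String × List (String × Int))), Dom_get_common_metrics data_dict → Spec_get_common_metrics data_dict (get_common_metrics data_dict)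

-- ===== LEMMAS AND PROOFS =====

-- the Lex key B's tuple sort orders by
def pvKey (m : String) : Lex (Int × String) := toLex (PySem.Dict.getD pvRank m 10, m)

theorem pv_insertBy_congr {α : Type} (b1 b2 : α → α → Bool) (h : ∀ a b, b1 a b = b2 a b)
    (x : α) (ys : List α) : PySem.List.insertBy b1 x ys = PySem.List.insertBy b2 x ys := by
  induction ys with
  | nil => rfl
  | cons y ys ih => simp [PySem.List.insertBy, h, ih]

theorem pv_foldl_insertBy_congr {α : Type} (b1 b2 : α → α → Bool) (h : ∀ a b, b1 a b = b2 a b)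
    (l : List α) (acc : List α) :
    l.foldl (fun acc x => PySem.List.insertBy b1 x acc) acc
      = l.foldl (fun acc x => PySem.List.insertBy b2 x acc) acc := by
  induction l generalizing acc with
  | nil => rfl
  | cons x t ih => simp only [List.foldl_cons]; rw [pv_insertBy_congr b1 b2 h]; exact ih _

theorem pv_sorted2_eq_sorted_lex (xs : List String) :
    PySem.List.sorted2 xs (fun m => PySem.Dict.getD pvRank m 10) (fun m => m) false
      = PySem.List.sorted xs pvKey false := by
  have hb : ∀ a b : String,
      (decide (PySem.Dict.getD pvRank a 10 < PySem.Dict.getD pvRank b 10) ||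
        (!decide (PySem.Dict.getD pvRank b 10 < PySem.Dict.getD pvRank a 10) && decide (a < b)))
      = decide (pvKey a < pvKey b) := by
    intro a b
    rcases lt_trichotomy (PySem.Dict.getD pvRank a 10) (PySem.Dict.getD pvRank b 10) with h | h | h
    · simp [pvKey, Prod.Lex.lt_iff, h, not_lt_of_gt h]
    · simp [pvKey, Prod.Lex.lt_iff, h]
    · simp [pvKey, Prod.Lex.lt_iff, not_lt_of_gt h, h.ne']
      intro hle; exact absurd hle (not_le_of_gt h)
  exact pv_foldl_insertBy_congr _ _ hb xs []

theorem pv_rank_notmem (m : String) (h : ¬ m ∈ pvPriority) :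
    PySem.Dict.getD pvRank m 10 = 10 := by
  simp only [pvPriority, List.mem_cons, not_or] at h
  obtain ⟨h1, h2, h3, h4, h5, h6, h7, h8, h9, h10, -⟩ := h
  have e : ∀ (s : String), ¬ m = s → (s == m) = false :=
    fun s hs => beq_eq_false_iff_ne.mpr (Ne.symm hs)
  simp [pvRank, pvPriority, PySem.Dict.getD, PySem.Dict.get?, PySem.List.enumerate,
    PySem.Dict.insert, PySem.Dict.contains, List.find?,
    e _ h1, e _ h2, e _ h3, e _ h4, e _ h5, e _ h6, e _ h7, e _ h8, e _ h9, e _ h10]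

theorem pv_loop_char (P : List String) (hP : P.Nodup) (s : List String) (hs : s.Nodup)
    (acc : List String) :
    P.foldl (fun (st : List String × PySem.Set String) m =>
        if PySem.Set.contains st.2 m then (st.1 ++ [m], PySem.Set.discard st.2 m) else st) (acc, s)
      = (acc ++ P.filter (fun m => s.contains m), s.filter (fun m => !P.contains m)) := by
  induction P generalizing acc s with
  | nil => simp
  | cons m P ih =>
    rcases List.nodup_cons.mp hP with ⟨hm, hP'⟩
    by_cases hms : m ∈ s
    · have hc : PySem.Set.contains s m = true := by
        simp [PySem.Set.contains, List.contains_iff_mem, hms]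
      have hnd : (PySem.Set.discard s m).Nodup := hs.filter _
      rw [List.foldl_cons]
      simp only [hc, if_pos]
      rw [ih hP' _ hnd]
      have hfc : List.filter (fun x => List.contains (PySem.Set.discard s m) x) P
          = List.filter (fun x => s.contains x) P := by
        apply List.filter_congr
        intro x hx
        have hxm : ¬ x = m := fun h => hm (h ▸ hx)
        simp [PySem.Set.discard, List.contains_iff_mem, List.mem_filter, hxm]
      apply Prod.ext
      · simp only [hfc]
        rw [List.filter_cons_of_pos (show (fun x => s.contains x) m = true from hc),
          List.append_assoc, List.singleton_append]
      · simp only [PySem.Set.discard, List.filter_filter]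
        apply List.filter_congr
        intro x hx
        by_cases hxm : x = m
        · subst hxm; simp
        · simp [hxm, Ne.symm hxm]
    · have hc : PySem.Set.contains s m = false := by
        simp [PySem.Set.contains, List.contains_iff_mem, hms]
      rw [List.foldl_cons]
      simp only [hc, if_neg, Bool.false_eq_true, not_false_iff]
      rw [ih hP' _ hs]
      apply Prod.ext
      · rw [List.filter_cons_of_neg (show ¬ (fun x => s.contains x) m = true by simpa using hms)]
      · apply List.filter_congr
        intro x hx
        have hxm : ¬ m = x := fun h => hms (h ▸ hx)
        simp [hxm, Ne.symm hxm]

theorem pv_nodup_foldl_inter (l : List (String × List (String × Int))) (s : List String)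
    (hs : s.Nodup) :
    (l.foldl (fun c p => PySem.Set.inter c (PySem.Dict.keys ⟨p.2⟩)) s).Nodup := by
  induction l generalizing s with
  | nil => exact hs
  | cons p l ih => exact ih _ (hs.filter _)

theorem pv_mem_foldl_inter (l : List (String × List (String × Int))) (s : List String) (x : String) :
    x ∈ l.foldl (fun c p => PySem.Set.inter c (PySem.Dict.keys ⟨p.2⟩)) s
      ↔ x ∈ s ∧ ∀ p ∈ l, x ∈ PySem.Dict.keys (⟨p.2⟩ : PySem.Dict String Int) := by
  induction l generalizing s with
  | nil => simp
  | cons p l ih =>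
    rw [List.foldl_cons, ih]
    simp only [PySem.Set.inter, List.mem_filter, List.mem_cons, List.contains_iff_mem]
    constructor
    · rintro ⟨⟨h1, h2⟩, h3⟩
      refine ⟨h1, fun q hq => ?_⟩
      rcases hq with rfl | hq
      · simpa using h2
      · exact h3 q hq
    · rintro ⟨h1, h2⟩
      exact ⟨⟨h1, by simpa using h2 p (Or.inl rfl)⟩, fun q hq => h2 q (Or.inr hq)⟩

theorem pv_key_lt_of_rank_lt {a b : String}
    (h : PySem.Dict.getD pvRank a 10 < PySem.Dict.getD pvRank b 10) : pvKey a < pvKey b := by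
  exact Prod.Lex.lt_iff.mpr (Or.inl h)

theorem pv_key_lt_of_rank_eq {a b : String}
    (h : PySem.Dict.getD pvRank a 10 = PySem.Dict.getD pvRank b 10) (hab : a < b) :
    pvKey a < pvKey b := by
  exact Prod.Lex.lt_iff.mpr (Or.inr ⟨h, hab⟩)

theorem pv_main : ∀ (data_dict : List (String × List (String × Int))),
    get_common_metrics data_dict = get_common_metrics_alt data_dict := by
  intro dd
  cases dd with
  | nil => rfl
  | cons first rest =>
    have hPnd : pvPriority.Nodup := by decide
    have hRankMono : pvPriority.Pairwise
        (fun a b => PySem.Dict.getD pvRank a 10 < PySem.Dict.getD pvRank b 10) := by decide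
    have hRankLt : ∀ m ∈ pvPriority, PySem.Dict.getD pvRank m 10 < 10 := by decide
    have hlen : ((pvPriority.length : Int)) = 10 := by decide
    simp only [get_common_metrics, get_common_metrics_alt, hlen]
    set CA := (first :: rest).foldl (fun c p => PySem.Set.inter c (PySem.Dict.keys ⟨p.2⟩))
      (PySem.Set.ofList (PySem.Dict.keys ⟨first.2⟩)) with hCA
    set CB := rest.foldl (fun c p => PySem.Set.inter c (PySem.Dict.keys ⟨p.2⟩))
      (PySem.Set.ofList (PySem.Dict.keys ⟨first.2⟩)) with hCB
    have hCAnd : CA.Nodup := pv_nodup_foldl_inter _ _ (PySem.Set.nodup_ofList _)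
    have hCBnd : CB.Nodup := pv_nodup_foldl_inter _ _ (PySem.Set.nodup_ofList _)
    have hmemAB : ∀ x, x ∈ CA ↔ x ∈ CB := by
      intro x
      rw [hCA, hCB, pv_mem_foldl_inter, pv_mem_foldl_inter]
      simp only [PySem.Set.mem_ofList, List.forall_mem_cons]
      constructor
      · rintro ⟨h1, _, h3⟩; exact ⟨h1, h3⟩
      · rintro ⟨h1, h3⟩; exact ⟨h1, by simpa [PySem.Dict.keys] using h1, h3⟩
    rw [pv_loop_char pvPriority hPnd CA hCAnd []]
    rw [pv_sorted2_eq_sorted_lex]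
    -- name the pieces of A's output
    set F1 := pvPriority.filter (fun m => CA.contains m) with hF1
    set F2 := CA.filter (fun m => !pvPriority.contains m) with hF2
    have hF2nd : F2.Nodup := hCAnd.filter _
    set S2 := PySem.List.sorted F2 (fun x => x) false with hS2
    have hS2perm : S2.Perm F2 := PySem.List.sorted_perm _ _ _
    have hS2nd : S2.Nodup := (hS2perm.symm).nodup hF2nd
    -- the target list is a permutation of CB
    have hperm : (List.nil ++ F1 ++ S2).Perm CB := by
      have p1 : F1.Perm (CA.filter (fun m => pvPriority.contains m)) := by
        rw [(List.perm_ext_iff_of_nodup (hPnd.filter _) (hCAnd.filter _))]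
        intro a
        simp only [hF1, List.mem_filter, PySem.Set.contains, List.contains_iff_mem]
        tauto
      have p2 : (CA.filter (fun m => pvPriority.contains m) ++ F2).Perm CA := by
        exact List.filter_append_perm _ _
      have p3 : CA.Perm CB :=
        (List.perm_ext_iff_of_nodup hCAnd hCBnd).mpr hmemAB
      have c1 : (List.nil ++ F1 ++ S2).Perm (F1 ++ F2) := by
        simpa using List.Perm.append (List.Perm.refl F1) hS2perm
      exact c1.trans (((p1.append (List.Perm.refl F2)).trans p2).trans p3)
    -- the target list is strictly increasing under pvKey
    have hpair : (List.nil ++ F1 ++ S2).Pairwise (fun a b => pvKey a < pvKey b) := by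
      simp only [List.nil_append]
      rw [List.pairwise_append]
      refine ⟨?_, ?_, ?_⟩
      · exact (hRankMono.filter _).imp pv_key_lt_of_rank_lt
      · have hle : S2.Pairwise (fun a b => a ≤ b) := PySem.List.sorted_pairwise F2 (fun x => x)
        have := hle.and hS2nd
        refine this.imp_of_mem ?_
        intro a b ha hb ⟨h1, h2⟩
        have ha' : a ∉ pvPriority := by
          have := (List.mem_filter.mp (hS2perm.mem_iff.mp ha)).2
          simpa [List.contains_iff_mem] using this
        have hb' : b ∉ pvPriority := by
          have := (List.mem_filter.mp (hS2perm.mem_iff.mp hb)).2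
          simpa [List.contains_iff_mem] using this
        exact pv_key_lt_of_rank_eq ((pv_rank_notmem a ha').trans (pv_rank_notmem b hb').symm)
          (lt_of_le_of_ne h1 h2)
      · intro a ha b hb
        have ha' : a ∈ pvPriority := (List.mem_filter.mp ha).1
        have hb' : b ∉ pvPriority := by
          have := (List.mem_filter.mp (hS2perm.mem_iff.mp hb)).2
          simpa [List.contains_iff_mem] using this
        refine pv_key_lt_of_rank_lt ?_
        rw [pv_rank_notmem b hb']
        exact hRankLt a ha'
    exact (PySem.List.sorted_eq_of_perm_of_pairwise_lt CB _ pvKey hperm hpair).symm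

-- ===== VERDICT (by name: the statement is the Claim_ definition above) =====
theorem get_common_metrics_spec : Claim_equal_get_common_metrics := by
  intro data_dict _
  unfold Spec_get_common_metrics
  exact pv_main data_dict
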